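-- pv_equiv track=rewrite | github.com/lockephi/Allentown-L104-Node | l104_numerical_engine/math_research/harmonic_numbers.py | _count_match
-- ===== SOURCE A (Python) =====
-- def _count_match(a: str, b: str) -> int:
--     """Count matching characters between strings."""
--     count = 0
--     for c1, c2 in zip(a, b):
--         if c1 == c2:
--             count += 1
--         elif c1 != '.' and c2 != '.':
--             break
--     return count
-- ===== SOURCE B (Python) =====
-- def _count_match(a: str, b: str) -> int:
--     """Count matching characters between strings."""
--     n = min(len(a), len(b))
--     # cut point: first index where both chars differ and neither is the wildcard
--     k = next((i for i in range(n) if a[i] != b[i] and a[i] != '.' and b[i] != '.'), n)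
--     # within the scanned prefix every unequal pair involves a wildcard; subtract them
--     return k - sum(a[i] != b[i] for i in range(k))
-- ===== Notes on version B (the rewrite author's own statement) =====
-- stated objective: alternative
-- what changed: Instead of one accumulator loop with a break, B first locates the cut index k (first position where both characters differ and neither is '.') by an index search over range(min len), then returns k minus the number of unequal positions before k, i.e. it counts mismatches and subtracts rather than counting matches.
import Mathlib
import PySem

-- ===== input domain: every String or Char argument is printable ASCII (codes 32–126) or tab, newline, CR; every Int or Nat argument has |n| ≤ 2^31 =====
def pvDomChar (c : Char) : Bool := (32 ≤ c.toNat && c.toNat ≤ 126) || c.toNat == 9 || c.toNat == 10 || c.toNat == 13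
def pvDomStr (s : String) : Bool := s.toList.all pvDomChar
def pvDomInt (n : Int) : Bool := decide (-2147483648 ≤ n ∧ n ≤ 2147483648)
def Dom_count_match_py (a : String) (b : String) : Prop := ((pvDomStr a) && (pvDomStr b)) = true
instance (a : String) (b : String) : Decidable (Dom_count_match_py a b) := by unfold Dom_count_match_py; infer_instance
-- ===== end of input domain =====

-- B replaces A's accumulator loop with a break by a cut-index search (first hard
-- mismatch) followed by k minus the number of unequal positions before the cut;
-- objective: alternative (same cost, different quantity computed).


-- ===== PORT A =====
-- A's loop over zip(a,b) with a count accumulator and break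
def countMatchLoop : List (Char × Char) → Int → Int
  | [], count => count
  | (c1, c2) :: rest, count =>
    if c1 == c2 then countMatchLoop rest (count + 1)
    else if c1 != '.' && c2 != '.' then count
    else countMatchLoop rest count

def count_match_py (a : String) (b : String) : Int :=
  countMatchLoop (a.toList.zip b.toList) 0

-- ===== PORT B =====
-- Source B: k = next((i for i in range(n) if a[i]!=b[i] and a[i]!='.' and b[i]!='.'), n);
-- return k - sum(a[i]!=b[i] for i in range(k)).  All indices are < n ≤ len, so the
-- total getD with a dummy default is exact for Python's a[i].
def count_match_py_alt (a : String) (b : String) : Int :=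
  let la := a.toList
  let lb := b.toList
  let n := min la.length lb.length
  let k := (((List.range n).find? (fun i =>
      la.getD i ' ' != lb.getD i ' ' && la.getD i ' ' != '.' && lb.getD i ' ' != '.')).getD n)
  (k : Int) - (((List.range k).countP (fun i => la.getD i ' ' != lb.getD i ' ')) : Nat)

-- ===== PRECONDITION & SPEC =====
def Spec_count_match_py (a : String) (b : String) (out : Int) : Prop := out = count_match_py_alt a b
instance (a : String) (b : String) (out : Int) : Decidable (Spec_count_match_py a b out) := by unfold Spec_count_match_py; infer_instance

-- ===== CLAIM (what is proved, stated in full; the proofs are below) =====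
def Claim_equal_count_match_py : Prop := ∀ (a : String) (b : String), Dom_count_match_py a b → Spec_count_match_py a b (count_match_py a b)

-- ===== LEMMAS AND PROOFS =====

-- A's loop counts the equal pairs in the soft prefix (before the first hard mismatch)
theorem countMatchLoop_eq (l : List (Char × Char)) (count : Int) :
    countMatchLoop l count =
      count + ((l.takeWhile (fun p => p.1 == p.2 || p.1 == '.' || p.2 == '.')).countP
        (fun p => p.1 == p.2) : Nat) := by
  induction l generalizing count with
  | nil => simp [countMatchLoop]
  | cons hd tl ih =>
    obtain ⟨c1, c2⟩ := hd
    by_cases h : c1 = c2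
    · simp [countMatchLoop, h, List.takeWhile, ih]
      ring
    · by_cases h1 : c1 = '.'
      · subst h1
        simp [countMatchLoop, h, List.takeWhile, ih]
      · by_cases h2 : c2 = '.'
        · subst h2
          simp [countMatchLoop, h, List.takeWhile, ih]
        · have hc : (c1 == c2 || c1 == '.' || c2 == '.') = false := by
            simp [h, h1, h2]
          simp [countMatchLoop, h, h1, h2, List.takeWhile, hc]


theorem find?_congr' {α : Type} (l : List α) (p q : α → Bool)
    (h : ∀ a ∈ l, p a = q a) : l.find? p = l.find? q := by
  induction l with
  | nil => rfl
  | cons hd tl ih =>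
    have hhd := h hd (by simp)
    rw [List.find?_cons, List.find?_cons, hhd]
    cases q hd with
    | true => rfl
    | false => exact ih (fun a ha => h a (by simp [ha]))

-- the first index (in range) failing p is the length of the takeWhile-p prefix
theorem find?_range_takeWhile {α : Type} (l : List α) (d : α) (p : α → Bool) :
    (((List.range l.length).find? (fun i => ! p (l.getD i d))).getD l.length)
      = (l.takeWhile p).length := by
  induction l with
  | nil => simp
  | cons hd tl ih =>
    rw [List.length_cons, List.range_succ_eq_map]
    by_cases h : p hd
    · rw [List.find?_cons_of_neg (by simp [h]), List.find?_map]
      have hcomp : ((fun i => ! p ((hd :: tl).getD i d)) ∘ Nat.succ)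
          = (fun i => ! p (tl.getD i d)) := by
        funext i; simp
      rw [hcomp, List.takeWhile_cons_of_pos h, List.length_cons]
      cases hfind : (List.range tl.length).find? (fun i => ! p (tl.getD i d)) with
      | none => rw [hfind] at ih; simpa using ih
      | some x => rw [hfind] at ih; simpa using ih
    · rw [List.find?_cons_of_pos (by simp [h]), List.takeWhile_cons_of_neg h]
      rfl

-- a countP over range k of an indexed predicate is a countP over take k
theorem countP_range_take {α : Type} (l : List α) (d : α) (q : α → Bool)
    (k : Nat) (hk : k ≤ l.length) :
    (List.range k).countP (fun i => q (l.getD i d)) = (l.take k).countP q := by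
  induction k with
  | zero => simp
  | succ m ih =>
    have hm : m < l.length := hk
    have hg : l[m]? = some (l.getD m d) := by
      rw [List.getElem?_eq_getElem hm, List.getD_eq_getElem l d hm]
    rw [List.range_succ, List.countP_append, ih (Nat.le_of_lt hm),
      List.take_add_one, List.countP_append, hg]
    simp

-- B's index predicates agree with the pairwise predicates on the zipped list
theorem bpred_hard (la lb : List Char) (i : Nat) (hi : i < (la.zip lb).length) :
    (la.getD i ' ' != lb.getD i ' ' && la.getD i ' ' != '.' && lb.getD i ' ' != '.')
      = ! ((fun p : Char × Char => p.1 == p.2 || p.1 == '.' || p.2 == '.')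
            ((la.zip lb).getD i (' ', ' '))) := by
  have hia : i < la.length := by simp at hi; omega
  have hib : i < lb.length := by simp at hi; omega
  rw [List.getD_eq_getElem _ _ hi, List.getElem_zip,
    List.getD_eq_getElem _ _ hia, List.getD_eq_getElem _ _ hib]
  simp [bne, Bool.not_or]

theorem bpred_ne (la lb : List Char) (i : Nat) (hi : i < (la.zip lb).length) :
    (la.getD i ' ' != lb.getD i ' ')
      = ((fun p : Char × Char => p.1 != p.2) ((la.zip lb).getD i (' ', ' '))) := by
  have hia : i < la.length := by simp at hi; omega
  have hib : i < lb.length := by simp at hi; omega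
  rw [List.getD_eq_getElem _ _ hi, List.getElem_zip,
    List.getD_eq_getElem _ _ hia, List.getD_eq_getElem _ _ hib]

theorem count_match_core (la lb : List Char) :
    countMatchLoop (la.zip lb) 0 =
      (let n := min la.length lb.length
       let k := (((List.range n).find? (fun i =>
          la.getD i ' ' != lb.getD i ' ' && la.getD i ' ' != '.' && lb.getD i ' ' != '.')).getD n)
       (k : Int) - (((List.range k).countP (fun i => la.getD i ' ' != lb.getD i ' ')) : Nat)) := by
  simp only
  have hmin : min la.length lb.length = (la.zip lb).length := (List.length_zip).symm
  rw [hmin]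
  -- B's cut index equals the length of A's soft prefix
  have hfind : (((List.range (la.zip lb).length).find? (fun i =>
      la.getD i ' ' != lb.getD i ' ' && la.getD i ' ' != '.' && lb.getD i ' ' != '.')).getD
      ((la.zip lb).length))
      = ((la.zip lb).takeWhile (fun p => p.1 == p.2 || p.1 == '.' || p.2 == '.')).length := by
    rw [find?_congr' _ _
        (fun i => ! ((fun p : Char × Char => p.1 == p.2 || p.1 == '.' || p.2 == '.')
          ((la.zip lb).getD i (' ', ' '))))
        (fun i hi => bpred_hard la lb i (List.mem_range.mp hi))]
    exact find?_range_takeWhile (la.zip lb) (' ', ' ') (fun p => p.1 == p.2 || p.1 == '.' || p.2 == '.')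
  rw [hfind]
  have hkle : ((la.zip lb).takeWhile
      (fun p => p.1 == p.2 || p.1 == '.' || p.2 == '.')).length ≤ (la.zip lb).length :=
    (List.takeWhile_prefix _).length_le
  -- B's mismatch count equals countP (≠) over the soft prefix
  have hcnt : (List.range ((la.zip lb).takeWhile
        (fun p => p.1 == p.2 || p.1 == '.' || p.2 == '.')).length).countP
        (fun i => la.getD i ' ' != lb.getD i ' ')
      = ((la.zip lb).takeWhile (fun p => p.1 == p.2 || p.1 == '.' || p.2 == '.')).countP
        (fun p => p.1 != p.2) := by
    rw [List.countP_congr (fun i hi =>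
      by rw [bpred_ne la lb i (lt_of_lt_of_le (List.mem_range.mp hi) hkle)])]
    rw [countP_range_take (la.zip lb) (' ', ' ') (fun p => p.1 != p.2) _ hkle]
    rw [← List.prefix_iff_eq_take.mp (List.takeWhile_prefix _)]
  rw [hcnt, countMatchLoop_eq]
  have hsplit := List.length_eq_countP_add_countP
    (p := fun p : Char × Char => p.1 == p.2)
    (l := (la.zip lb).takeWhile (fun p => p.1 == p.2 || p.1 == '.' || p.2 == '.'))
  simp only [bne, decide_not, Bool.decide_eq_true] at *
  omega

-- ===== VERDICT (by name: the statement is the Claim_ definition above) =====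
theorem count_match_py_spec : Claim_equal_count_match_py := by
  intro a b _
  unfold Spec_count_match_py count_match_py count_match_py_alt
  exact count_match_core a.toList b.toList
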